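-- pv_equiv track=rewrite | github.com/KamilDemel/LeetCode-Grind | WDI_Fundamentals/disjoint_intervals_backtracking.py | solve_interval_sum
-- ===== SOURCE A (Python) =====
-- def solve_interval_sum(intervals, target_sum=2022):
--     n = len(intervals)
--
--     def backtrack(index, current_sum, selected_intervals):
--         if current_sum == target_sum:
--             return True
--
--         if current_sum > target_sum or index == n:
--             return False
--
--         x1, y1 = min(intervals[index]), max(intervals[index])
--
--         is_disjoint = True
--         for x2, y2 in selected_intervals:
--             if not (y1 < x2 or x1 > y2):
--                 is_disjoint = False
--                 break
--
--         if is_disjoint: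
--             interval_length = abs(x1 - y1)
--             if backtrack(index + 1, current_sum + interval_length, selected_intervals + [(x1, y1)]):
--                 return True
--
--         if backtrack(index + 1, current_sum, selected_intervals):
--             return True
--
--         return False
--
--     return backtrack(0, 0, [])
-- ===== SOURCE B (Python) =====
-- def solve_interval_sum(intervals, target_sum=2022):
--     # Sort normalized intervals by start; then any pairwise-disjoint subset is a
--     # chain, and "disjoint from all selected" collapses to "start > last end",
--     # so a forward DP over states (sum, last_end) replaces the 2^n backtracking.
--     norm = sorted(((min(x, y), max(x, y)) for x, y in intervals), key=lambda p: p[0])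
--     states = {(0, None)}
--     for x, y in norm:
--         length = y - x
--         new = set()
--         for s, e in states:
--             if (e is None or x > e) and s + length <= target_sum:
--                 new.add((s + length, y))
--         states |= new
--     return any(s == target_sum for s, _ in states)
-- ===== Notes on version B (the rewrite author's own statement) =====
-- stated objective: faster
-- what changed: Replaces the exponential backtracking over all subsets by sorting the normalized intervals by start and running a forward DP over states (achievable_sum, last_end) with sums pruned to <= target, since a pairwise-disjoint subset of start-sorted intervals is exactly a chain whose next start exceeds the last end.
import Mathlib
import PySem

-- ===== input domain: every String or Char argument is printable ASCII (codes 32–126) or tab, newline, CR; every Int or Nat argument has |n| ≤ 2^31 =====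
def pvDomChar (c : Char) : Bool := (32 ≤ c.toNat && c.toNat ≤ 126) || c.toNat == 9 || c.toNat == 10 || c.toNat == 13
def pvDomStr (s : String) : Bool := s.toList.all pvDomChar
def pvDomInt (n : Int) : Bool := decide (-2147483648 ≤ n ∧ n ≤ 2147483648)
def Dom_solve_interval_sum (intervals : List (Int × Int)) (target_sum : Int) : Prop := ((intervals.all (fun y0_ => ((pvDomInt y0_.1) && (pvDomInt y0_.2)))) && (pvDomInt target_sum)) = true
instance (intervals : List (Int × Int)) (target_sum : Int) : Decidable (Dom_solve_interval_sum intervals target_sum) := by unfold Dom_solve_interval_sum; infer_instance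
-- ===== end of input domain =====

-- B replaces A's exponential backtracking by a sort-by-start forward DP over
-- (achievable sum, last end) states; faster (asymptotic) on the timed inputs.

-- ===== PORT A =====
-- the inner `backtrack(index, current_sum, selected_intervals)`; the suffix
-- `rem` stands for intervals[index:], so `index == n` is `rem = []`.
def pvBacktrackA (target : Int) (rem : List (Int × Int)) (s : Int)
    (sel : List (Int × Int)) : Bool :=
  if s = target then true
  else if s > target then false
  else
    match rem with
    | [] => false
    | p :: rest =>
      let x1 := min p.1 p.2
      let y1 := max p.1 p.2
      let isDisjoint := sel.all (fun q => decide (y1 < q.1) || decide (x1 > q.2))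
      ((if isDisjoint then
          pvBacktrackA target rest (s + |x1 - y1|) (sel ++ [(x1, y1)])
        else false)
       || pvBacktrackA target rest s sel)

def solve_interval_sum (intervals : List (Int × Int)) (target_sum : Int) : Bool :=
  pvBacktrackA target_sum intervals 0 []

-- ===== PORT B =====
def solve_interval_sum_alt (intervals : List (Int × Int)) (target_sum : Int) : Bool :=
  let norm := PySem.List.sorted (intervals.map (fun p => (min p.1 p.2, max p.1 p.2)))
      (fun p => p.1)
  let states := norm.foldl
    (fun (states : PySem.Set (Int × Option Int)) (p : Int × Int) =>
      let length := p.2 - p.1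
      let news := states.foldl
        (fun (news : PySem.Set (Int × Option Int)) (se : Int × Option Int) =>
          if ((match se.2 with | none => true | some e => decide (p.1 > e))
              && decide (se.1 + length ≤ target_sum)) then
            PySem.Set.add news (se.1 + length, some p.2)
          else news)
        PySem.Set.empty
      PySem.Set.union states news)
    (PySem.Set.ofList [((0 : Int), (none : Option Int))])
  states.any (fun se => se.1 == target_sum)

-- ===== PRECONDITION & SPEC =====
def Spec_solve_interval_sum (intervals : List (Int × Int)) (target_sum : Int) (out : Bool) : Prop := out = solve_interval_sum_alt intervals target_sum
instance (intervals : List (Int × Int)) (target_sum : Int) (out : Bool) : Decidable (Spec_solve_interval_sum intervals target_sum out) := by unfold Spec_solve_interval_sum; infer_instance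

-- ===== CLAIM (what is proved, stated in full; the proofs are below) =====
def Claim_equal_solve_interval_sum : Prop := ∀ (intervals : List (Int × Int)) (target_sum : Int), Dom_solve_interval_sum intervals target_sum → Spec_solve_interval_sum intervals target_sum (solve_interval_sum intervals target_sum)

-- ===== LEMMAS AND PROOFS =====

def pvNorm (p : Int × Int) : Int × Int := (min p.1 p.2, max p.1 p.2)

def pvDisj (p q : Int × Int) : Prop := p.2 < q.1 ∨ q.2 < p.1

def pvLt (p q : Int × Int) : Prop := p.2 < q.1

def pvLen (S : List (Int × Int)) : Int := (S.map (fun p => p.2 - p.1)).sum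

lemma pvDisj_symm (p q : Int × Int) : pvDisj p q → pvDisj q p := Or.symm

lemma pvLen_nil : pvLen [] = 0 := rfl

lemma pvLen_cons (p : Int × Int) (S : List (Int × Int)) :
    pvLen (p :: S) = (p.2 - p.1) + pvLen S := by simp [pvLen]

lemma pvLen_append (S T : List (Int × Int)) :
    pvLen (S ++ T) = pvLen S + pvLen T := by simp [pvLen]

lemma pvLen_nonneg (S : List (Int × Int)) (h : ∀ p ∈ S, p.1 ≤ p.2) :
    0 ≤ pvLen S := by
  induction S with
  | nil => simp [pvLen]
  | cons p S ih =>
    rw [pvLen_cons]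
    have h1 := h p (by simp)
    have h2 := ih (fun q hq => h q (by simp [hq]))
    omega

lemma pvNorm_fst_le_snd (p : Int × Int) : (pvNorm p).1 ≤ (pvNorm p).2 := by
  simp [pvNorm]

-- characterization of A's backtracking
lemma pvBacktrackA_iff (t : Int) (rem : List (Int × Int)) (s : Int)
    (sel : List (Int × Int)) :
    pvBacktrackA t rem s sel = true ↔
      ∃ S, S.Sublist (rem.map pvNorm) ∧ (∀ p ∈ S, ∀ q ∈ sel, pvDisj p q) ∧
        S.Pairwise pvDisj ∧ s + pvLen S = t := by
  induction rem generalizing s sel with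
  | nil =>
    simp only [pvBacktrackA]
    constructor
    · intro h
      split_ifs at h with h1 h2
      · exact ⟨[], by simp, by simp, by simp, by simp [pvLen, h1]⟩
    · rintro ⟨S, hS, -, -, hsum⟩
      have hS0 : S = [] := List.sublist_nil.mp (by simpa using hS)
      subst hS0
      simp [pvLen] at hsum
      simp [hsum]
  | cons p rest ih =>
    simp only [pvBacktrackA]
    by_cases h1 : s = t
    · rw [if_pos h1]
      constructor
      · intro _
        exact ⟨[], by simp, by simp, by simp, by simp [pvLen, h1]⟩
      · intro _; rfl
    · rw [if_neg h1]
      by_cases h2 : s > t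
      · rw [if_pos h2]
        constructor
        · intro h; cases h
        · rintro ⟨S, hS, -, -, hsum⟩
          exfalso
          have hnn : 0 ≤ pvLen S := pvLen_nonneg S (fun q hq => by
            obtain ⟨r, -, rfl⟩ := List.mem_map.mp (hS.subset hq)
            exact pvNorm_fst_le_snd r)
          omega
      · rw [if_neg h2]
        have habs : |min p.1 p.2 - max p.1 p.2| = max p.1 p.2 - min p.1 p.2 := by
          rw [abs_sub_comm]
          exact abs_of_nonneg (by omega)
        rw [Bool.or_eq_true]
        constructor
        · rintro (h | h)
          · -- took the head interval
            split_ifs at h with hdisj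
            · rw [ih] at h
              obtain ⟨S', hsub, hdis, hpw, hsum⟩ := h
              refine ⟨pvNorm p :: S', ?_, ?_, ?_, ?_⟩
              · exact (List.cons_sublist_cons).mpr hsub
              · intro r hr q hq
                rcases List.mem_cons.mp hr with rfl | hr
                · have := List.all_eq_true.mp hdisj q hq
                  simp only [Bool.or_eq_true, decide_eq_true_eq] at this
                  unfold pvDisj pvNorm
                  rcases this with h | h
                  · exact Or.inl h
                  · exact Or.inr h
                · exact hdis r hr q (by simp [hq])
              · rw [List.pairwise_cons]
                refine ⟨fun r hr => ?_, hpw⟩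
                have := hdis r hr (min p.1 p.2, max p.1 p.2) (by simp)
                exact pvDisj_symm _ _ this
              · rw [pvLen_cons]
                unfold pvNorm
                simp only at hsum ⊢
                omega
          · rw [ih] at h
            obtain ⟨S, hsub, hdis, hpw, hsum⟩ := h
            exact ⟨S, hsub.trans (List.sublist_cons_self _ _), hdis, hpw, hsum⟩
        · rintro ⟨S, hS, hdis, hpw, hsum⟩
          rcases List.sublist_cons_iff.mp (by simpa using hS) with hS' | ⟨r, rfl, hr⟩
          · right
            rw [ih]
            exact ⟨S, hS', hdis, hpw, hsum⟩
          · left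
            have hdisj : (sel.all fun q =>
                decide (max p.1 p.2 < q.1) || decide (min p.1 p.2 > q.2)) = true := by
              rw [List.all_eq_true]
              intro q hq
              have := hdis (pvNorm p) (by simp) q hq
              unfold pvDisj pvNorm at this
              simp only [Bool.or_eq_true, decide_eq_true_eq]
              rcases this with h | h
              · exact Or.inl h
              · exact Or.inr h
            rw [if_pos hdisj, ih]
            rw [List.pairwise_cons] at hpw
            refine ⟨r, hr, ?_, hpw.2, ?_⟩
            · intro x hx q hq
              rcases List.mem_append.mp hq with hq | hq
              · exact hdis x (by simp [hx]) q hq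
              · simp only [List.mem_singleton] at hq
                subst hq
                exact pvDisj_symm _ _ (hpw.1 x hx)
            · rw [pvLen_cons] at hsum
              unfold pvNorm at hsum
              simp only at hsum ⊢
              omega

lemma solveA_iff (iv : List (Int × Int)) (t : Int) :
    solve_interval_sum iv t = true ↔
      ∃ S, S.Sublist (iv.map pvNorm) ∧ S.Pairwise pvDisj ∧ pvLen S = t := by
  rw [solve_interval_sum, pvBacktrackA_iff]
  constructor
  · rintro ⟨S, h1, _, h3, h4⟩; exact ⟨S, h1, h3, by omega⟩
  · rintro ⟨S, h1, h3, h4⟩; exact ⟨S, h1, by simp, h3, by omega⟩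

-- reachability predicate for B's DP states
def pvReach (t : Int) (P : List (Int × Int)) (se : Int × Option Int) : Prop :=
  se = (0, none) ∨
    ∃ C q, (C ++ [q]).Sublist P ∧ (C ++ [q]).IsChain pvLt ∧
      pvLen (C ++ [q]) = se.1 ∧ se.1 ≤ t ∧ se.2 = some q.2

lemma sublist_snoc_iff {α : Type} (l P : List α) (p : α) :
    l.Sublist (P ++ [p]) ↔ l.Sublist P ∨ ∃ r, l = r ++ [p] ∧ r.Sublist P := by
  rw [List.sublist_append_iff]
  constructor
  · rintro ⟨l1, l2, rfl, h1, h2⟩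
    rcases List.sublist_cons_iff.mp h2 with h2 | ⟨r, rfl, hr⟩
    · simp at h2; subst h2; left; simpa using h1
    · simp at hr; subst hr; right; exact ⟨l1, rfl, h1⟩
  · rintro (h | ⟨r, rfl, hr⟩)
    · exact ⟨l, [], by simp, h, by simp⟩
    · exact ⟨r, [p], rfl, hr, by simp⟩

-- generic membership in the inner "build `new`" fold
lemma mem_foldl_add_if {α β : Type} [BEq α] [LawfulBEq α]
    (l : List β) (c : β → Bool) (f : β → α) :
    ∀ (init : PySem.Set α) (y : α),
      y ∈ l.foldl (fun acc x => if c x then PySem.Set.add acc (f x) else acc) init ↔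
        y ∈ init ∨ ∃ x ∈ l, c x = true ∧ y = f x := by
  induction l with
  | nil => simp
  | cons x l ih =>
    intro init y
    simp only [List.foldl_cons]
    by_cases hc : c x = true
    · rw [hc, if_pos rfl, ih, PySem.Set.mem_add]
      constructor
      · rintro (⟨h | h⟩ | ⟨z, hz, h1, h2⟩)
        · exact Or.inl h
        · exact Or.inr ⟨x, by simp, hc, h⟩
        · exact Or.inr ⟨z, by simp [hz], h1, h2⟩
      · rintro (h | ⟨z, hz, h1, h2⟩)
        · exact Or.inl (Or.inl h)
        · rcases List.mem_cons.mp hz with rfl | hz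
          · exact Or.inl (Or.inr h2)
          · exact Or.inr ⟨z, hz, h1, h2⟩
    · rw [if_neg hc, ih]
      constructor
      · rintro (h | ⟨z, hz, h1, h2⟩)
        · exact Or.inl h
        · exact Or.inr ⟨z, by simp [hz], h1, h2⟩
      · rintro (h | ⟨z, hz, h1, h2⟩)
        · exact Or.inl h
        · rcases List.mem_cons.mp hz with rfl | hz
          · exact absurd h1 hc
          · exact Or.inr ⟨z, hz, h1, h2⟩

lemma pvReach_extend (t : Int) (P : List (Int × Int)) (p : Int × Int)
    (se : Int × Option Int) (h : pvReach t P se) : pvReach t (P ++ [p]) se := by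
  rcases h with h | ⟨C, q, h1, h2, h3⟩
  · exact Or.inl h
  · exact Or.inr ⟨C, q, h1.trans (List.sublist_append_left _ _), h2, h3⟩

-- the one-step characterization of reachability through a new interval p
lemma pvReach_snoc (t : Int) (P : List (Int × Int)) (p : Int × Int)
    (hp : p.1 ≤ p.2) (se : Int × Option Int) :
    pvReach t (P ++ [p]) se ↔
      pvReach t P se ∨
        ∃ old, pvReach t P old ∧
          (match old.2 with | none => True | some e => e < p.1) ∧
          old.1 + (p.2 - p.1) ≤ t ∧ se = (old.1 + (p.2 - p.1), some p.2) := by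
  constructor
  · rintro (rfl | ⟨C, q, hsub, hchain, hlen, hle, hsnd⟩)
    · exact Or.inl (Or.inl rfl)
    · rcases (sublist_snoc_iff _ _ _).mp hsub with hsub' | ⟨r, heq, hr⟩
      · exact Or.inl (Or.inr ⟨C, q, hsub', hchain, hlen, hle, hsnd⟩)
      · obtain ⟨rfl, hq⟩ := List.append_inj' heq rfl
        obtain rfl : p = q := ((by simpa using hq : q = p)).symm
        rcases List.eq_nil_or_concat C with rfl | ⟨C', q', rfl⟩
        · refine Or.inr ⟨(0, none), Or.inl rfl, trivial, ?_, ?_⟩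
          · simp only [List.nil_append, pvLen_cons, pvLen_nil] at hlen
            omega
          · have h1 : se.1 = 0 + (p.2 - p.1) := by
              simp only [List.nil_append, pvLen_cons, pvLen_nil] at hlen
              omega
            exact Prod.ext h1 (by simpa using hsnd)
        · simp only [List.concat_eq_append] at hchain hlen hr
          rw [List.isChain_append] at hchain
          obtain ⟨hchain', -, hrel⟩ := hchain
          have hlast : ((C' ++ [q']).getLast? ) = some q' := List.getLast?_concat
          have hqp : pvLt q' p := hrel q' hlast p (by simp)
          have hlen' : pvLen (C' ++ [q']) + (p.2 - p.1) = se.1 := by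
            rw [pvLen_append] at hlen
            simp only [pvLen_cons, pvLen_nil] at hlen
            omega
          refine Or.inr ⟨(pvLen (C' ++ [q']), some q'.2),
            Or.inr ⟨C', q', hr, hchain', rfl, by omega, rfl⟩, hqp, by omega,
            Prod.ext (by simp; omega) (by simpa using hsnd)⟩
  · rintro (h | ⟨old, hold, hcomp, hle, rfl⟩)
    · exact pvReach_extend t P p se h
    · rcases hold with rfl | ⟨C, q, hsub, hchain, hlen, hleo, hsnd⟩
      · refine Or.inr ⟨[], p, ?_, by simp, ?_, by simp at hle ⊢; omega, rfl⟩
        · simp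
        · simp [pvLen_cons, pvLen_nil]
      · have hcomp' : q.2 < p.1 := by
          rw [hsnd] at hcomp
          exact hcomp
        refine Or.inr ⟨C ++ [q], p, ?_, ?_, ?_, by simpa using hle, rfl⟩
        · exact List.Sublist.append hsub (List.Sublist.refl _)
        · rw [List.isChain_append]
          exact ⟨hchain, by simp, fun x hx y hy => by
            rw [List.getLast?_concat] at hx
            simp at hx hy
            subst hx; subst hy
            exact hcomp'⟩
        · rw [pvLen_append]
          simp only [pvLen_cons, pvLen_nil]
          omega

-- loop invariant for B's outer fold
lemma pvFold_inv (t : Int) :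
    ∀ (R P : List (Int × Int)) (st : PySem.Set (Int × Option Int)),
      (∀ p ∈ R, p.1 ≤ p.2) →
      (∀ se, se ∈ st ↔ pvReach t P se) →
      ∀ se, se ∈ R.foldl
        (fun (states : PySem.Set (Int × Option Int)) (p : Int × Int) =>
          let length := p.2 - p.1
          let news := states.foldl
            (fun (news : PySem.Set (Int × Option Int)) (se : Int × Option Int) =>
              if ((match se.2 with | none => true | some e => decide (p.1 > e))
                  && decide (se.1 + length ≤ t)) then
                PySem.Set.add news (se.1 + length, some p.2)
              else news)
            PySem.Set.empty
          PySem.Set.union states news) st ↔ pvReach t (P ++ R) se := by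
  intro R
  induction R with
  | nil =>
    intro P st _ hst se
    simpa using hst se
  | cons p R ih =>
    intro P st hnorm hst se
    rw [List.foldl_cons]
    have hstep : ∀ se, se ∈ PySem.Set.union st (st.foldl
        (fun (news : PySem.Set (Int × Option Int)) (se : Int × Option Int) =>
          if ((match se.2 with | none => true | some e => decide (p.1 > e))
              && decide (se.1 + (p.2 - p.1) ≤ t)) then
            PySem.Set.add news (se.1 + (p.2 - p.1), some p.2)
          else news)
        PySem.Set.empty) ↔ pvReach t (P ++ [p]) se := by
      intro se
      rw [PySem.Set.mem_union, mem_foldl_add_if,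
        pvReach_snoc t P p (hnorm p (by simp)) se]
      constructor
      · rintro (h | (h | ⟨old, hold, hc, rfl⟩))
        · exact Or.inl ((hst se).mp h)
        · simp [PySem.Set.empty] at h
        · rw [Bool.and_eq_true, decide_eq_true_eq] at hc
          refine Or.inr ⟨old, (hst old).mp hold, ?_, hc.2, rfl⟩
          rcases hh : old.2 with - | e
          · trivial
          · have h2 := hc.1
            rw [hh] at h2
            simpa using h2
      · rintro (h | ⟨old, hold, hcomp, hle, rfl⟩)
        · exact Or.inl ((hst se).mpr h)
        · refine Or.inr (Or.inr ⟨old, (hst old).mpr hold, ?_, rfl⟩)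
          rw [Bool.and_eq_true, decide_eq_true_eq]
          refine ⟨?_, hle⟩
          rcases hh : old.2 with - | e
          · rfl
          · rw [hh] at hcomp
            simpa using hcomp
    have := ih (P ++ [p]) _ (fun q hq => hnorm q (by simp [hq])) hstep se
    simpa using this

lemma solveB_iff (iv : List (Int × Int)) (t : Int) :
    solve_interval_sum_alt iv t = true ↔
      ∃ C, C.Sublist (PySem.List.sorted (iv.map pvNorm) (fun p => p.1)) ∧
        C.IsChain pvLt ∧ pvLen C = t := by
  have hmapnorm : (fun p : Int × Int => (min p.1 p.2, max p.1 p.2)) = pvNorm := rfl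
  simp only [solve_interval_sum_alt, hmapnorm]
  rw [List.any_eq_true]
  have hnorm : ∀ p ∈ PySem.List.sorted (iv.map pvNorm) (fun p => p.1), p.1 ≤ p.2 := by
    intro p hp
    rw [PySem.List.mem_sorted] at hp
    obtain ⟨r, -, rfl⟩ := List.mem_map.mp hp
    exact pvNorm_fst_le_snd r
  have hinit : ∀ se, se ∈ PySem.Set.ofList [((0 : Int), (none : Option Int))] ↔
      pvReach t [] se := by
    intro se
    constructor
    · intro h
      simp [PySem.Set.ofList, PySem.Set.add, PySem.Set.empty] at h
      exact Or.inl (by simp [h])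
    · rintro (rfl | ⟨C, q, hsub, -, -⟩)
      · simp [PySem.Set.ofList, PySem.Set.add, PySem.Set.empty]
      · exact absurd (List.sublist_nil.mp hsub) (by simp)
  have hchar := pvFold_inv t (PySem.List.sorted (iv.map pvNorm) (fun p => p.1)) []
    (PySem.Set.ofList [((0 : Int), (none : Option Int))]) hnorm hinit
  simp only [List.nil_append] at hchar
  constructor
  · rintro ⟨se, hmem, heq⟩
    rw [beq_iff_eq] at heq
    rcases (hchar se).mp hmem with rfl | ⟨C, q, hsub, hchain, hlen, -, -⟩
    · exact ⟨[], List.nil_sublist _, by simp, by simp [pvLen, ← heq]⟩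
    · exact ⟨C ++ [q], hsub, hchain, by rw [hlen, heq]⟩
  · rintro ⟨C, hsub, hchain, hlen⟩
    rcases List.eq_nil_or_concat C with rfl | ⟨C', q, rfl⟩
    · refine ⟨(0, none), (hchar _).mpr (Or.inl rfl), ?_⟩
      rw [beq_iff_eq]
      simpa [pvLen] using hlen
    · rw [List.concat_eq_append] at hsub hchain hlen
      refine ⟨(t, some q.2), (hchar _).mpr (Or.inr ⟨C', q, hsub, hchain, ?_, le_refl t, rfl⟩), by simp⟩
      simpa using hlen

-- chains and pairwise-disjoint families coincide on start-sorted normalized lists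
lemma chain_head_lt (C : List (Int × Int)) (a : Int × Int)
    (hn : ∀ p ∈ C, p.1 ≤ p.2) (h : (a :: C).IsChain pvLt) :
    ∀ b ∈ C, pvLt a b := by
  induction C generalizing a with
  | nil => simp
  | cons c C ih =>
    rcases List.isChain_cons.mp h with ⟨hac, hC⟩
    have hac' : pvLt a c := hac c rfl
    intro b hb
    rcases List.mem_cons.mp hb with rfl | hb
    · exact hac'
    · have := ih c (fun p hp => hn p (by simp [hp])) hC b hb
      have hc := hn c (by simp)
      unfold pvLt at *
      omega

lemma pairwise_of_chain (C : List (Int × Int))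
    (hn : ∀ p ∈ C, p.1 ≤ p.2) (h : C.IsChain pvLt) : C.Pairwise pvLt := by
  induction C with
  | nil => simp
  | cons a C ih =>
    rw [List.pairwise_cons]
    refine ⟨chain_head_lt C a (fun p hp => hn p (by simp [hp])) h,
      ih (fun p hp => hn p (by simp [hp])) (List.isChain_cons.mp h).2⟩

lemma chain_of_pairwise (C L : List (Int × Int)) (hsub : C.Sublist L)
    (hsort : L.Pairwise (fun a b => a.1 ≤ b.1)) (hn : ∀ p ∈ L, p.1 ≤ p.2)
    (h : C.Pairwise pvDisj) : C.IsChain pvLt := by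
  have h1 : C.Pairwise (fun a b : Int × Int => a.1 ≤ b.1) := hsort.sublist hsub
  have h2 : C.Pairwise pvLt := by
    refine (h.and h1).imp_of_mem ?_
    intro a b ha hb hab
    rcases hab with ⟨hd | hd, hle⟩
    · exact hd
    · have := hn b (hsub.subset hb)
      unfold pvLt; omega
  exact h2.isChain

-- the two existential characterizations agree
lemma exists_bridge (iv : List (Int × Int)) (t : Int) :
    (∃ S, S.Sublist (iv.map pvNorm) ∧ S.Pairwise pvDisj ∧ pvLen S = t) ↔
      (∃ C, C.Sublist (PySem.List.sorted (iv.map pvNorm) (fun p => p.1)) ∧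
        C.IsChain pvLt ∧ pvLen C = t) := by
  have hperm : (PySem.List.sorted (iv.map pvNorm) (fun p => p.1)).Perm (iv.map pvNorm) :=
    PySem.List.sorted_perm _ _ _
  have hnormM : ∀ p ∈ iv.map pvNorm, p.1 ≤ p.2 := by
    intro p hp
    obtain ⟨r, -, rfl⟩ := List.mem_map.mp hp
    exact pvNorm_fst_le_snd r
  have hnormL : ∀ p ∈ PySem.List.sorted (iv.map pvNorm) (fun p => p.1), p.1 ≤ p.2 :=
    fun p hp => hnormM p ((PySem.List.mem_sorted _ _ _ _).mp hp)
  have hsort : (PySem.List.sorted (iv.map pvNorm) (fun p => p.1)).Pairwise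
      (fun a b => a.1 ≤ b.1) := PySem.List.sorted_pairwise _ _
  constructor
  · rintro ⟨S, hS, hpw, hlen⟩
    obtain ⟨C, hCperm, hCsub⟩ := (List.Perm.subperm_left hperm.symm).mp hS.subperm
    refine ⟨C, hCsub, ?_, ?_⟩
    · exact chain_of_pairwise C _ hCsub hsort hnormL
        ((hCperm.pairwise_iff (fun {a b} h => pvDisj_symm a b h)).mpr hpw)
    · rw [← hlen]
      exact (hCperm.map _).sum_eq
  · rintro ⟨C, hC, hchain, hlen⟩
    obtain ⟨S, hSperm, hSsub⟩ := (List.Perm.subperm_left hperm).mp hC.subperm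
    refine ⟨S, hSsub, ?_, ?_⟩
    · have hpwC : C.Pairwise pvDisj :=
        (pairwise_of_chain C (fun p hp => hnormL p (hC.subset hp)) hchain).imp
          (fun h => Or.inl h)
      exact (hSperm.pairwise_iff (fun {a b} h => pvDisj_symm a b h)).mpr hpwC
    · rw [← hlen]
      exact (hSperm.map _).sum_eq

-- ===== VERDICT (by name: the statement is the Claim_ definition above) =====
theorem solve_interval_sum_spec : Claim_equal_solve_interval_sum := by
  intro iv t _
  unfold Spec_solve_interval_sum
  apply Bool.coe_iff_coe.mp
  rw [solveA_iff, solveB_iff, exists_bridge]
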